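-- pv_equiv track=rewrite | github.com/TheSilverClassic/Magic_Square | src/main.py | validateMatrixValues
-- ===== SOURCE A (Python) =====
-- def validateMatrixValues(matrix):
--     size = len(matrix)
--     values = []
--
--     for row in matrix:
--         for value in row:
--             if not isinstance(value, int) or value < 1 or value > size * size:
--                 return False
--             values.append(value)
--
--     if len(set(values)) != size * size:
--         return False
--
--     return True
-- ===== SOURCE B (Python) =====
-- def validateMatrixValues(matrix):
--     n = len(matrix) * len(matrix)
--     for row in matrix:
--         for value in row:
--             if not isinstance(value, int) or value < 1 or value > n:
--                 return False
--     for k in range(1, n + 1):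
--         if not any(value == k for row in matrix for value in row):
--             return False
--     return True
-- ===== Notes on version B (the rewrite author's own statement) =====
-- stated objective: alternative
-- what changed: Replaces A's collect-all-entries list plus a final set-cardinality test by two staged passes with no set at all: first a pure range check of every entry, then a coverage loop that for each target k in 1..n^2 scans the matrix for an occurrence of k (a subset of {1..n^2} has n^2 distinct members iff it covers every target).
import Mathlib
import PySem

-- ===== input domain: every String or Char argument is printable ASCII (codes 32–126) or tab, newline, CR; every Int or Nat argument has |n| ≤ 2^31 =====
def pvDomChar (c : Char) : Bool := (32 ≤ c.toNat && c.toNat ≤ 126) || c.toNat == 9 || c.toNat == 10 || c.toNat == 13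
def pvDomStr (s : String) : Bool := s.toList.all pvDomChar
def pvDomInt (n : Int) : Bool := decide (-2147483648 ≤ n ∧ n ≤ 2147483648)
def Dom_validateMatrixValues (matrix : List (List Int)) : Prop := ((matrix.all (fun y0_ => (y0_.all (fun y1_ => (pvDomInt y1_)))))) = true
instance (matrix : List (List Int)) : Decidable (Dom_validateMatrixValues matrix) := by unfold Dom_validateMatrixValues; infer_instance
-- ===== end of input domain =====

-- B replaces A's collected-values list + set-cardinality test by two staged passes without any
-- set: a range check of every entry, then a coverage loop scanning the matrix for each target
-- k in 1..n^2 (objective: alternative; a subset of {1..n^2} has n^2 members iff it covers all).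

-- ===== PORT A =====
-- inner 'for value in row' loop: early return False (none) on an out-of-range value, else append
def rowLoopA (sq : Int) : List Int → List Int → Option (List Int)
  | [], values => some values
  | v :: vs, values =>
    if v < 1 || v > sq then none
    else rowLoopA sq vs (values ++ [v])

-- outer 'for row in matrix' loop
def rowsLoopA (sq : Int) : List (List Int) → List Int → Option (List Int)
  | [], values => some values
  | row :: rows, values =>
    match rowLoopA sq row values with
    | none => none
    | some values' => rowsLoopA sq rows values'

def validateMatrixValues (matrix : List (List Int)) : Bool :=
  let size : Int := matrix.length
  match rowsLoopA (size * size) matrix [] with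
  | none => false
  | some values =>
    if ((PySem.Set.ofList values).length : Int) ≠ size * size then false
    else true

-- ===== PORT B =====
-- first pass, inner loop: range check with early return False
def rowRangeB (n : Int) : List Int → Bool
  | [] => true
  | v :: vs => if v < 1 || v > n then false else rowRangeB n vs

-- first pass, outer loop
def rowsRangeB (n : Int) : List (List Int) → Bool
  | [] => true
  | row :: rows => if rowRangeB n row then rowsRangeB n rows else false

-- second pass: 'for k in range(1, n+1): if not any(...): return False'
def coverLoopB (matrix : List (List Int)) : List Int → Bool
  | [] => true
  | k :: ks =>
    if matrix.any (fun row => row.any (fun v => v == k)) then coverLoopB matrix ks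
    else false

def validateMatrixValues_alt (matrix : List (List Int)) : Bool :=
  let n : Int := (matrix.length : Int) * matrix.length
  if rowsRangeB n matrix then coverLoopB matrix (PySem.List.pyRange 1 (n + 1) 1)
  else false

-- ===== PRECONDITION & SPEC =====
def Spec_validateMatrixValues (matrix : List (List Int)) (out : Bool) : Prop := out = validateMatrixValues_alt matrix
instance (matrix : List (List Int)) (out : Bool) : Decidable (Spec_validateMatrixValues matrix out) := by unfold Spec_validateMatrixValues; infer_instance

-- ===== CLAIM (what is proved, stated in full; the proofs are below) =====
def Claim_equal_validateMatrixValues : Prop := ∀ (matrix : List (List Int)), Dom_validateMatrixValues matrix → Spec_validateMatrixValues matrix (validateMatrixValues matrix)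

-- ===== LEMMAS AND PROOFS =====

-- the shared range guard, as a Bool predicate
def okR (sq v : Int) : Bool := !(decide (v < 1) || decide (v > sq))

lemma rowLoopA_eq (sq : Int) (vs values : List Int) :
    rowLoopA sq vs values = if vs.all (okR sq) then some (values ++ vs) else none := by
  induction vs generalizing values with
  | nil => simp [rowLoopA]
  | cons v vs ih =>
    cases hg : (decide (v < 1) || decide (v > sq)) with
    | true =>
      have hv : okR sq v = false := by simp [okR, hg]
      simp [rowLoopA, hg, List.all_cons, hv]
    | false =>
      have hv : okR sq v = true := by simp [okR, hg]
      simp [rowLoopA, hg, List.all_cons, hv, ih, List.append_assoc]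

lemma rowsLoopA_eq (sq : Int) (rows : List (List Int)) (values : List Int) :
    rowsLoopA sq rows values =
      if rows.all (fun r => r.all (okR sq)) then some (values ++ rows.flatten) else none := by
  induction rows generalizing values with
  | nil => simp [rowsLoopA]
  | cons row rows ih =>
    rw [rowsLoopA, rowLoopA_eq]
    by_cases h : row.all (okR sq)
    · simp [h, ih, List.append_assoc]
    · simp [h]

lemma rowRangeB_eq (n : Int) (vs : List Int) : rowRangeB n vs = vs.all (okR n) := by
  induction vs with
  | nil => simp [rowRangeB]
  | cons v vs ih =>
    cases hg : (decide (v < 1) || decide (v > n)) with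
    | true =>
      have hv : okR n v = false := by simp [okR, hg]
      simp [rowRangeB, hg, List.all_cons, hv]
    | false =>
      have hv : okR n v = true := by simp [okR, hg]
      simp [rowRangeB, hg, List.all_cons, hv, ih]

lemma rowsRangeB_eq (n : Int) (rows : List (List Int)) :
    rowsRangeB n rows = rows.all (fun r => r.all (okR n)) := by
  induction rows with
  | nil => simp [rowsRangeB]
  | cons row rows ih =>
    rw [rowsRangeB, rowRangeB_eq]
    by_cases h : row.all (okR n) <;> simp [h, ih]

lemma coverLoopB_eq (matrix : List (List Int)) (ks : List Int) :
    coverLoopB matrix ks = ks.all (fun k => decide (k ∈ matrix.flatten)) := by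
  induction ks with
  | nil => simp [coverLoopB]
  | cons k ks ih =>
    have hmem : (matrix.any (fun row => row.any (fun v => v == k))) = decide (k ∈ matrix.flatten) := by
      rw [Bool.eq_iff_iff]
      simp only [List.any_eq_true, beq_iff_eq, decide_eq_true_eq, List.mem_flatten]
      constructor
      · rintro ⟨r, hr, v, hv, rfl⟩; exact ⟨r, hr, hv⟩
      · rintro ⟨r, hr, hk⟩; exact ⟨r, hr, k, hk, rfl⟩
    rw [coverLoopB, hmem, ih]
    by_cases h : k ∈ matrix.flatten
    · simp [h, List.all_cons]
      intro _
      exact List.mem_flatten.mp h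
    · simp [h, List.all_cons]
      intro x hx hkx
      exact absurd (List.mem_flatten.mpr ⟨x, hx, hkx⟩) h

-- distinct-count = n  ↔  coverage of 1..n, for a list of entries all inside [1, n]
lemma card_eq_iff_cover (n : Int) (hn : 0 ≤ n) (flat : List Int)
    (hin : ∀ v ∈ flat, 1 ≤ v ∧ v ≤ n) :
    (((PySem.Set.ofList flat).length : Int) = n) ↔ (∀ k : Int, 1 ≤ k → k ≤ n → k ∈ flat) := by
  have hnd : (PySem.Set.ofList flat).Nodup := PySem.Set.nodup_ofList flat
  have hfin : (PySem.Set.ofList flat).toFinset = flat.toFinset := by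
    ext x; simp [List.mem_toFinset, PySem.Set.mem_ofList]
  have hlen : (PySem.Set.ofList flat).length = flat.toFinset.card := by
    rw [← hfin, List.toFinset_card_of_nodup hnd]
  have hsub : flat.toFinset ⊆ Finset.Icc (1 : Int) n := by
    intro x hx
    rw [List.mem_toFinset] at hx
    rcases hin x hx with ⟨h1, h2⟩
    simp [Finset.mem_Icc, h1, h2]
  have hcardT : (Finset.Icc (1 : Int) n).card = (n + 1 - 1).toNat := Int.card_Icc 1 n
  rw [hlen]
  constructor
  · intro h k hk1 hk2
    have hcard : (Finset.Icc (1 : Int) n).card ≤ flat.toFinset.card := by rw [hcardT]; omega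
    have heq := Finset.eq_of_subset_of_card_le hsub hcard
    have : k ∈ flat.toFinset := by rw [heq]; simp [Finset.mem_Icc]; omega
    rwa [List.mem_toFinset] at this
  · intro h
    have hsup : Finset.Icc (1 : Int) n ⊆ flat.toFinset := by
      intro x hx
      rw [Finset.mem_Icc] at hx
      rw [List.mem_toFinset]
      exact h x hx.1 hx.2
    have heq : flat.toFinset = Finset.Icc (1 : Int) n := Finset.Subset.antisymm hsub hsup
    rw [heq, hcardT]; omega

-- ===== VERDICT (by name: the statement is the Claim_ definition above) =====
theorem validateMatrixValues_spec : Claim_equal_validateMatrixValues := by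
  intro matrix _
  unfold Spec_validateMatrixValues validateMatrixValues validateMatrixValues_alt
  simp only [rowsLoopA_eq, rowsRangeB_eq, coverLoopB_eq, List.nil_append]
  set n : Int := (matrix.length : Int) * matrix.length with hn
  have hn0 : 0 ≤ n := by positivity
  by_cases hall : (matrix.all fun r => r.all (okR n)) = true
  · simp only [hall, if_pos]  -- select the all-in-range branch on both sides
    have hin : ∀ v ∈ matrix.flatten, 1 ≤ v ∧ v ≤ n := by
      intro v hv
      rw [List.mem_flatten] at hv
      rcases hv with ⟨r, hr, hv⟩
      have h1 := (List.all_eq_true.mp hall) r hr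
      have h2 := (List.all_eq_true.mp h1) v hv
      simp [okR] at h2
      omega
    have hiff := card_eq_iff_cover n hn0 matrix.flatten hin
    by_cases hc : ((PySem.Set.ofList matrix.flatten).length : Int) = n
    · simp [hc]
      intro x h1 h2
      exact List.mem_flatten.mp (hiff.mp hc x h1 h2)
    · have hnot : ¬ ∀ k : Int, 1 ≤ k → k ≤ n → k ∈ matrix.flatten := fun h => hc (hiff.mpr h)
      push Not at hnot
      rcases hnot with ⟨k, hk1, hk2, hk3⟩
      simp [hc]
      exact ⟨k, ⟨hk1, hk2⟩, fun r hr hkr => hk3 (List.mem_flatten.mpr ⟨r, hr, hkr⟩)⟩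
  · simp [hall]
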